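-- pv_equiv track=rewrite | github.com/pypi-data/pypi-mirror-219 | packages/pyscivis/pyscivis-0.9.2-py3-none-any.whl/pyscivis/visualizer/util/jit_nanminmax.py | even_chunk_ranges
-- ===== SOURCE A (Python) =====
-- from typing import Union, Tuple, List
--
-- def even_chunk_sizes(dividend: int,
--                      divisor: int
--                      ) -> List[int]:
--     """ Calculate even chunk sizes. """
--     quotient, remainder = divmod(dividend, divisor)
--     cells = [quotient for _ in range(divisor)]
--     for i in range(remainder):
--         cells[i] += 1
--     return cells
--
-- def even_chunk_ranges(dividend: int,
--                       divisor: int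
--                       ) -> List[Tuple[int, int]]:
--     """ Calculate chunk ranges in form of '[(start_0, end_0), ..., (start_n-1, end_n-1)]'. """
--     sizes = even_chunk_sizes(dividend, divisor)
--     ranges = []
--     start = 0
--     for s in sizes:
--         end = start + s
--         ranges.append((start, end))
--         start = end
--     return ranges
-- ===== SOURCE B (Python) =====
-- def even_chunk_ranges(dividend: int, divisor: int):
--     """ Calculate chunk ranges in form of '[(start_0, end_0), ..., (start_n-1, end_n-1)]'. """
--     quotient, remainder = divmod(dividend, divisor)
--     return [(i * quotient + min(i, remainder),
--              (i + 1) * quotient + min(i + 1, remainder))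
--             for i in range(divisor)]
-- ===== Notes on version B (the rewrite author's own statement) =====
-- stated objective: simpler
-- what changed: B emits each (start,end) pair directly by a closed-form formula (i*q + min(i,r)) in one comprehension, replacing A's two-phase construction of a sizes list followed by a running-start accumulation loop.
import Mathlib
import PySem

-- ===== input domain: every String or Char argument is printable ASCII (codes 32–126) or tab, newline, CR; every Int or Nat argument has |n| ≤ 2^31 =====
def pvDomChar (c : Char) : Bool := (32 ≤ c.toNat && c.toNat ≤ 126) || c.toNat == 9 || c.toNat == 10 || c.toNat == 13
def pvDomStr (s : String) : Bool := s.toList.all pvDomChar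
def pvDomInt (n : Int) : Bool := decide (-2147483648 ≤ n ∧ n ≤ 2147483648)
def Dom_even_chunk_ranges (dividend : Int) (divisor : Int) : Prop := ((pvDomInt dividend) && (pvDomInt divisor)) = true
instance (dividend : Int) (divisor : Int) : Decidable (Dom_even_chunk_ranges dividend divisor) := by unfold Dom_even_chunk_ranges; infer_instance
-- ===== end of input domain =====

-- B replaces A's two-phase sizes-list + running-start accumulation with one closed-form
-- formula per chunk index (objective: simpler).

-- ===== PORT A =====
-- helper 'even_chunk_sizes' of A; the in-place 'cells[i] += 1' runs over i in range(remainder),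
-- where i is nonnegative and (whenever cells is nonempty) in range, so List.set/getD at i.toNat is exact
def even_chunk_sizes (dividend : Int) (divisor : Int) : List Int :=
  let quotient := PySem.Int.floordiv dividend divisor
  let remainder := PySem.Int.mod dividend divisor
  let cells := (PySem.List.pyRange 0 divisor 1).map (fun _ => quotient)
  (PySem.List.pyRange 0 remainder 1).foldl
    (fun c i => c.set i.toNat (c.getD i.toNat 0 + 1)) cells

def even_chunk_ranges (dividend : Int) (divisor : Int) : List (Int × Int) :=
  let sizes := even_chunk_sizes dividend divisor
  (sizes.foldl (fun (st : List (Int × Int) × Int) s => (st.1 ++ [(st.2, st.2 + s)], st.2 + s))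
    ([], 0)).1

-- ===== PORT B =====
def even_chunk_ranges_alt (dividend : Int) (divisor : Int) : List (Int × Int) :=
  let quotient := PySem.Int.floordiv dividend divisor
  let remainder := PySem.Int.mod dividend divisor
  (PySem.List.pyRange 0 divisor 1).map
    (fun i => (i * quotient + min i remainder, (i + 1) * quotient + min (i + 1) remainder))

-- ===== PRECONDITION & SPEC =====
-- Pre_ excludes only divisor = 0, where Python A raises ZeroDivisionError (divmod by zero).
def Pre_even_chunk_ranges (dividend : Int) (divisor : Int) : Prop := divisor ≠ 0
instance (dividend : Int) (divisor : Int) : Decidable (Pre_even_chunk_ranges dividend divisor) := by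
  unfold Pre_even_chunk_ranges; infer_instance

def pvWitness_even_chunk_ranges : Int × Int := (10, 3)

def Spec_even_chunk_ranges (dividend : Int) (divisor : Int) (out : List (Int × Int)) : Prop :=
  out = even_chunk_ranges_alt dividend divisor
instance (dividend : Int) (divisor : Int) (out : List (Int × Int)) :
    Decidable (Spec_even_chunk_ranges dividend divisor out) := by
  unfold Spec_even_chunk_ranges; infer_instance

-- ===== CLAIM (what is proved, stated in full; the proofs are below) =====
def Claim_equal_even_chunk_ranges : Prop := ∀ (dividend : Int) (divisor : Int),
  Dom_even_chunk_ranges dividend divisor → Pre_even_chunk_ranges dividend divisor →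
  Spec_even_chunk_ranges dividend divisor (even_chunk_ranges dividend divisor)

-- ===== LEMMAS AND PROOFS =====

-- the increment loop on the empty list does nothing
theorem foldl_incr_nil (l : List Int) :
    l.foldl (fun (c : List Int) i => c.set i.toNat (c.getD i.toNat 0 + 1)) [] = [] := by
  induction l with
  | nil => rfl
  | cons a t ih => simpa using ih

-- the increment loop on a constant list of length v raises the first r entries by one
theorem foldl_incr_eq (q v : Int) (n : ℕ) (hnv : (n : Int) ≤ v) :
    (PySem.List.pyRange 0 (n : Int) 1).foldl
        (fun (c : List Int) i => c.set i.toNat (c.getD i.toNat 0 + 1))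
        ((PySem.List.pyRange 0 v 1).map (fun _ => q))
    = (PySem.List.pyRange 0 v 1).map (fun i => if i < (n : Int) then q + 1 else q) := by
  induction n with
  | zero =>
    rw [show PySem.List.pyRange 0 ((0 : ℕ) : Int) 1 = [] from
      PySem.List.pyRange_one_eq_nil (by omega)]
    simp only [List.foldl_nil]
    refine List.map_congr_left ?_
    intro i hi
    have := (PySem.List.mem_pyRange_one.mp hi).1
    rw [if_neg (by omega)]
  | succ m ih =>
    have hm : (m : Int) ≤ v := by push_cast at hnv; omega
    have hsplit : PySem.List.pyRange 0 ((m : Int) + 1) 1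
        = PySem.List.pyRange 0 (m : Int) 1 ++ [(m : Int)] :=
      PySem.List.pyRange_one_succ_right (by positivity)
    have hcast : ((m + 1 : ℕ) : Int) = (m : Int) + 1 := by push_cast; ring
    rw [hcast, hsplit, List.foldl_append, ih hm]
    have hlen : ((PySem.List.pyRange 0 v 1).map
        (fun i => if i < (m : Int) then q + 1 else q)).length = (v - 0).toNat := by
      simp [PySem.List.length_pyRange_one]
    have hmlt : m < ((PySem.List.pyRange 0 v 1).map
        (fun i => if i < (m : Int) then q + 1 else q)).length := by
      rw [hlen]; omega
    have hget : ((PySem.List.pyRange 0 v 1).map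
        (fun i => if i < (m : Int) then q + 1 else q)).getD m 0 = q := by
      rw [List.getD_eq_getElem _ _ hmlt]
      simp [PySem.List.getElem_pyRange_one]
    simp only [List.foldl_cons, List.foldl_nil, Int.toNat_natCast, hget]
    apply List.ext_getElem
    · simp
    · intro j h1 h2
      have hj : j < (v - 0).toNat := by simpa [hlen] using (by simpa using h1)
      rw [List.getElem_set]
      simp only [List.getElem_map, PySem.List.getElem_pyRange_one]
      split_ifs <;> omega

-- prefix-sum list of ranges (proof helper for A's accumulation loop)
def mkRanges : List Int → Int → List (Int × Int)
  | [], _ => []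
  | a :: t, s => (s, s + a) :: mkRanges t (s + a)

theorem foldl_ranges_eq (l : List Int) (acc : List (Int × Int)) (s : Int) :
    (l.foldl (fun (st : List (Int × Int) × Int) x => (st.1 ++ [(st.2, st.2 + x)], st.2 + x))
      (acc, s)).1 = acc ++ mkRanges l s := by
  induction l generalizing acc s with
  | nil => simp [mkRanges]
  | cons a t ih => simp [mkRanges, ih]

theorem mkRanges_map (f g : Int → Int) (hfg : ∀ i, g (i + 1) = g i + f i) :
    ∀ (n : ℕ) (j v : Int), (v - j).toNat = n →
      mkRanges ((PySem.List.pyRange j v 1).map f) (g j)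
        = (PySem.List.pyRange j v 1).map (fun i => (g i, g (i + 1))) := by
  intro n
  induction n with
  | zero =>
    intro j v h
    rw [PySem.List.pyRange_one_eq_nil (by omega)]
    rfl
  | succ m ih =>
    intro j v h
    rw [PySem.List.pyRange_one_cons (by omega)]
    simp only [List.map_cons, mkRanges]
    rw [← hfg j, ih (j + 1) v (by omega)]

theorem even_chunk_ranges_eq (dividend divisor : Int) (h : divisor ≠ 0) :
    even_chunk_ranges dividend divisor = even_chunk_ranges_alt dividend divisor := by
  rcases lt_or_gt_of_ne h with hneg | hpos
  · -- divisor < 0: range(divisor) is empty on both sides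
    unfold even_chunk_ranges even_chunk_sizes even_chunk_ranges_alt
    rw [PySem.List.pyRange_one_eq_nil (le_of_lt hneg)]
    simp only [List.map_nil]
    rw [foldl_incr_nil]
    simp
  · -- divisor > 0
    set q := PySem.Int.floordiv dividend divisor with hq
    set r := PySem.Int.mod dividend divisor with hr
    have hr0 : 0 ≤ r := by
      rw [hr, PySem.Int.mod_eq_emod_of_pos hpos]
      exact Int.emod_nonneg _ (by omega)
    have hrv : r < divisor := by
      rw [hr, PySem.Int.mod_eq_emod_of_pos hpos]
      exact Int.emod_lt_of_pos _ hpos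
    obtain ⟨n, hn⟩ : ∃ n : ℕ, r = (n : Int) := ⟨r.toNat, (Int.toNat_of_nonneg hr0).symm⟩
    have hsizes := foldl_incr_eq q divisor n (by omega)
    unfold even_chunk_ranges even_chunk_sizes even_chunk_ranges_alt
    simp only [← hq, ← hr, hn, hsizes, foldl_ranges_eq, List.nil_append]
    have hg : ∀ i : Int, (fun i => i * q + min i (n : Int)) (i + 1)
        = (fun i => i * q + min i (n : Int)) i + (if i < (n : Int) then q + 1 else q) := by
      intro i
      simp only
      have : (i + 1) * q = i * q + q := by ring
      rw [this]
      split_ifs <;> omega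
    have h0 : (0 : Int) * q + min 0 (n : Int) = 0 := by omega
    have hmk := mkRanges_map (fun i => if i < (n : Int) then q + 1 else q)
      (fun i => i * q + min i (n : Int)) hg (divisor - 0).toNat 0 divisor rfl
    beta_reduce at hmk
    rw [h0] at hmk
    rw [hmk]

-- ===== VERDICT (by name: the statement is the Claim_ definition above) =====
theorem even_chunk_ranges_spec : Claim_equal_even_chunk_ranges := by
  intro dividend divisor _ hpre
  exact even_chunk_ranges_eq dividend divisor hpre
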